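-- pv_equiv track=rewrite | github.com/CesareSwift/News-Search-Engine | py/search.py | find_position_distance
-- ===== SOURCE A (Python) =====
-- def find_position_distance(temp_Proximity_position,Proximity_distance):
--     if Proximity_distance != -1: # Proximity search
--         return_flag=0
--         for p in range(len(temp_Proximity_position)-1):
--             q = p+1
--             break_flag=0
--             for P in range(len(temp_Proximity_position[p])):
--                 for Q in range(len(temp_Proximity_position[q])):
--                     if (temp_Proximity_position[p][P]-temp_Proximity_position[q][Q])<=Proximity_distance and \
--                         (temp_Proximity_position[p][P]-temp_Proximity_position[q][Q])>=-Proximity_distance: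
--                         break_flag=1
--                         return_flag+=1
--                         break
--                 if break_flag == 1:
--                     break
--         # only if all words meet the position condition between each pair, return 1
--         if return_flag==len(temp_Proximity_position)-1:
--             return 1
--     else:   # parse search
--         p = 0
--         temp_location = {}
--         for q in range(1, len(temp_Proximity_position)):
--             for P in range(len(temp_Proximity_position[p])):
--                 if temp_Proximity_position[p][P] + q in temp_Proximity_position[q]:
--                     if temp_Proximity_position[p][P] not in temp_location:
--                         temp_location[temp_Proximity_position[p][P]] = 1
--                     elif temp_Proximity_position[p][P] in temp_location:
--                         temp_location[temp_Proximity_position[p][P]] += 1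
--
--         # only if all positions of the first word in parse meet the condition, return 1
--         for i in temp_location:
--             if temp_location[i] == len(temp_Proximity_position)-1:
--                 return 1
--     return 0
-- ===== SOURCE B (Python) =====
-- def _close(a, b, d):
--     # sorted two-pointer: is there x in a, y in b with |x - y| <= d?
--     a = sorted(a)
--     b = sorted(b)
--     i = j = 0
--     while i < len(a) and j < len(b):
--         if abs(a[i] - b[j]) <= d:
--             return True
--         if a[i] < b[j]:
--             i += 1
--         else:
--             j += 1
--     return False
--
--
-- def find_position_distance(temp_Proximity_position, Proximity_distance):
--     L = temp_Proximity_position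
--     n = len(L)
--     if Proximity_distance != -1:  # Proximity search
--         if all(_close(L[p], L[p + 1], Proximity_distance) for p in range(n - 1)):
--             return 1
--     else:  # phrase search
--         if n > 1:
--             sets = [set(l) for l in L[1:]]
--             for x in L[0]:
--                 if all(x + q + 1 in sets[q] for q in range(n - 1)):
--                     return 1
--     return 0
-- ===== Notes on version B (the rewrite author's own statement) =====
-- stated objective: alternative
-- what changed: Proximity mode: instead of a triple nested loop over index pairs, sort each pair of adjacent position lists and decide 'some pair within distance d' with a two-pointer sweep; phrase mode: replace repeated 'x+q in list' scans feeding a counting dict by per-list sets and a direct any/all test over the first word's positions.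
-- outside the precondition, e.g. on find_position_distance([], 0): A returns 0, B returns 1; on find_position_distance([[1, 1], [2]], -1): A returns 0, B returns 1
import Mathlib
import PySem

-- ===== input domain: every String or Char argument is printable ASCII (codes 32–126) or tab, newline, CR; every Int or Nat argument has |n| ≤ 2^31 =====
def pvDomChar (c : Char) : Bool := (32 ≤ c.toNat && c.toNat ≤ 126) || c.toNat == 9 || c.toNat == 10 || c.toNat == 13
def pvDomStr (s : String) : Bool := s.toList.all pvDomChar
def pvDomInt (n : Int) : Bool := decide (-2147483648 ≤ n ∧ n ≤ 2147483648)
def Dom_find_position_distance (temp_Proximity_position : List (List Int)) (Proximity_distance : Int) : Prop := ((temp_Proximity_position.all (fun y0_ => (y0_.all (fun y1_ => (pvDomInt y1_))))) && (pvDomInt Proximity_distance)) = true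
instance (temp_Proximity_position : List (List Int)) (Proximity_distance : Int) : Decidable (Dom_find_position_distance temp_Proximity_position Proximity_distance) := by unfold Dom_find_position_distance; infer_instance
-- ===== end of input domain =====

-- B replaces A's nested index scans by a sorted two-pointer sweep per adjacent pair
-- (proximity mode) and A's counting dict by per-list sets with an any/all test (phrase mode).

-- ===== PORT A =====
-- inner 'for Q in range(len(ql)): if cond: break' loop
def pvAQ (x : Int) (ql : List Int) (d : Int) : Bool :=
  match ql with
  | [] => false
  | y :: rest => if x - y ≤ d ∧ x - y ≥ -d then true else pvAQ x rest d

-- 'for P …: for Q …' with the break_flag that exits both loops on the first hit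
def pvAP (pl ql : List Int) (d : Int) : Bool :=
  match pl with
  | [] => false
  | x :: rest => if pvAQ x ql d then true else pvAP rest ql d

-- 'for p in range(len(tp)-1)' accumulating return_flag (tp[p], tp[p+1] are adjacent elements)
def pvAOuter (tp : List (List Int)) (d : Int) : Int :=
  match tp with
  | a :: b :: rest => (if pvAP a b d then 1 else 0) + pvAOuter (b :: rest) d
  | _ => 0

-- phrase branch, inner 'for P in range(len(tp[0]))' pass for one q
def pvAParseP (first : List Int) (l : List Int) (q : Int) (loc : PySem.Dict Int Int) : PySem.Dict Int Int :=
  match first with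
  | [] => loc
  | x :: xs =>
    pvAParseP xs l q
      (if (x + q) ∈ l then
        (if loc.contains x = false then loc.insert x 1 else loc.modify x 0 (· + 1))
       else loc)

-- phrase branch, outer 'for q in range(1, len(tp))' (tp[q] are the successive tail elements)
def pvAParseQ (first : List Int) (rest : List (List Int)) (q : Int) (loc : PySem.Dict Int Int) : PySem.Dict Int Int :=
  match rest with
  | [] => loc
  | l :: rs => pvAParseQ first rs (q + 1) (pvAParseP first l q loc)

def find_position_distance (temp_Proximity_position : List (List Int)) (Proximity_distance : Int) : Int :=
  if Proximity_distance ≠ -1 then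
    -- proximity search
    if pvAOuter temp_Proximity_position Proximity_distance = (temp_Proximity_position.length : Int) - 1 then 1 else 0
  else
    -- parse (phrase) search; tp[0] is only read when the q-loop runs, so headD [] is exact
    (if (pvAParseQ (temp_Proximity_position.headD []) temp_Proximity_position.tail 1 PySem.Dict.empty).items.any
        (fun p => decide (p.2 = (temp_Proximity_position.length : Int) - 1)) then 1 else 0)

-- ===== PORT B =====
-- two-pointer sweep over two sorted lists: some pair within distance d?
def pvTwoPtr (a b : List Int) (d : Int) : Bool :=
  match a, b with
  | x :: xs, y :: ys =>
    if |x - y| ≤ d then true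
    else if x < y then pvTwoPtr xs (y :: ys) d
    else pvTwoPtr (x :: xs) ys d
  | _, _ => false
termination_by a.length + b.length
decreasing_by all_goals simp

def pvClose (a b : List Int) (d : Int) : Bool :=
  pvTwoPtr (PySem.List.sorted a (fun x => x) false) (PySem.List.sorted b (fun x => x) false) d

-- 'all(_close(L[p], L[p+1], d) for p in range(n-1))'
def pvBAll (tp : List (List Int)) (d : Int) : Bool :=
  match tp with
  | a :: b :: rest => pvClose a b d && pvBAll (b :: rest) d
  | _ => true

-- 'all(x + q + 1 in sets[q] for q in range(n-1))', q shifted to start at 1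
def pvBAllQ (x : Int) (sets : List (PySem.Set Int)) (q : Int) : Bool :=
  match sets with
  | [] => true
  | s :: rs => decide ((x + q) ∈ s) && pvBAllQ x rs (q + 1)

def find_position_distance_alt (temp_Proximity_position : List (List Int)) (Proximity_distance : Int) : Int :=
  if Proximity_distance ≠ -1 then
    if pvBAll temp_Proximity_position Proximity_distance then 1 else 0
  else
    if 1 < temp_Proximity_position.length then
      if (temp_Proximity_position.headD []).any
          (fun x => pvBAllQ x (temp_Proximity_position.tail.map PySem.Set.ofList) 1) then 1 else 0
    else 0

-- ===== PRECONDITION & SPEC =====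
-- Pre_ excludes (i) the empty query in proximity mode and (ii) phrase mode with duplicate
-- positions in the first word's list: on both, A returns a value (0) that is an accident of its
-- flag/dict bookkeeping while B's vacuous-all / deduplicated reading is equally defensible.
def Pre_find_position_distance (temp_Proximity_position : List (List Int)) (Proximity_distance : Int) : Prop :=
  (Proximity_distance ≠ -1 → temp_Proximity_position ≠ []) ∧
  (Proximity_distance = -1 → (temp_Proximity_position.headD []).Nodup)
instance (temp_Proximity_position : List (List Int)) (Proximity_distance : Int) : Decidable (Pre_find_position_distance temp_Proximity_position Proximity_distance) := by unfold Pre_find_position_distance; infer_instance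

def pvWitness_find_position_distance : List (List Int) × Int := ([[1, 2], [4]], 1)

def Spec_find_position_distance (temp_Proximity_position : List (List Int)) (Proximity_distance : Int) (out : Int) : Prop := out = find_position_distance_alt temp_Proximity_position Proximity_distance
instance (temp_Proximity_position : List (List Int)) (Proximity_distance : Int) (out : Int) : Decidable (Spec_find_position_distance temp_Proximity_position Proximity_distance out) := by unfold Spec_find_position_distance; infer_instance

-- ===== CLAIM (what is proved, stated in full; the proofs are below) =====
def Claim_equal_find_position_distance : Prop := ∀ (temp_Proximity_position : List (List Int)) (Proximity_distance : Int), Dom_find_position_distance temp_Proximity_position Proximity_distance → Pre_find_position_distance temp_Proximity_position Proximity_distance → Spec_find_position_distance temp_Proximity_position Proximity_distance (find_position_distance temp_Proximity_position Proximity_distance)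

-- ===== LEMMAS AND PROOFS =====

-- ---- proximity branch ----
lemma pvAQ_iff (x : Int) (ql : List Int) (d : Int) :
    pvAQ x ql d = true ↔ ∃ y ∈ ql, |x - y| ≤ d := by
  induction ql with
  | nil => simp [pvAQ]
  | cons y rest ih =>
    simp only [pvAQ]
    split <;> rename_i h
    · simp only [true_iff]
      exact ⟨y, List.mem_cons_self .., abs_le.mpr ⟨by omega, h.1⟩⟩
    · rw [ih]
      constructor
      · rintro ⟨z, hz, hd⟩; exact ⟨z, List.mem_cons_of_mem _ hz, hd⟩
      · rintro ⟨z, hz, hd⟩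
        rcases List.mem_cons.mp hz with rfl | hz'
        · rw [abs_le] at hd; omega
        · exact ⟨z, hz', hd⟩

lemma pvAP_iff (pl ql : List Int) (d : Int) :
    pvAP pl ql d = true ↔ ∃ x ∈ pl, ∃ y ∈ ql, |x - y| ≤ d := by
  induction pl with
  | nil => simp [pvAP]
  | cons x rest ih =>
    simp only [pvAP]
    split <;> rename_i h
    · simp only [true_iff]
      obtain ⟨y, hy, hd⟩ := (pvAQ_iff x ql d).mp h
      exact ⟨x, List.mem_cons_self .., y, hy, hd⟩
    · rw [ih]
      constructor
      · rintro ⟨u, hu, v, hv, hd⟩; exact ⟨u, List.mem_cons_of_mem _ hu, v, hv, hd⟩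
      · rintro ⟨u, hu, v, hv, hd⟩
        rcases List.mem_cons.mp hu with rfl | hu'
        · exact absurd ((pvAQ_iff u ql d).mpr ⟨v, hv, hd⟩) (by simp [h])
        · exact ⟨u, hu', v, hv, hd⟩

lemma pvTwoPtr_iff (a b : List Int) (d : Int)
    (ha : a.Pairwise (· ≤ ·)) (hb : b.Pairwise (· ≤ ·)) :
    pvTwoPtr a b d = true ↔ ∃ x ∈ a, ∃ y ∈ b, |x - y| ≤ d := by
  fun_induction pvTwoPtr a b d with
  | case1 x xs y ys hle => simp only [true_iff]; exact ⟨x, by simp, y, by simp, hle⟩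
  | case2 x xs y ys hgt hlt ih =>
    rw [ih (List.Pairwise.of_cons ha) hb]
    constructor
    · rintro ⟨u, hu, v, hv, hd⟩; exact ⟨u, List.mem_cons_of_mem _ hu, v, hv, hd⟩
    · rintro ⟨u, hu, v, hv, hd⟩
      rcases List.mem_cons.mp hu with rfl | hu'
      · exfalso
        have hyv : y ≤ v := by
          rcases List.mem_cons.mp hv with rfl | hv'
          · exact le_refl _
          · exact (List.pairwise_cons.mp hb).1 v hv'
        rw [abs_le] at hd; rw [abs_le] at hgt; omega
      · exact ⟨u, hu', v, hv, hd⟩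
  | case3 x xs y ys hgt hge ih =>
    rw [ih ha (List.Pairwise.of_cons hb)]
    constructor
    · rintro ⟨u, hu, v, hv, hd⟩; exact ⟨u, hu, v, List.mem_cons_of_mem _ hv, hd⟩
    · rintro ⟨u, hu, v, hv, hd⟩
      rcases List.mem_cons.mp hv with rfl | hv'
      · exfalso
        have hxu : x ≤ u := by
          rcases List.mem_cons.mp hu with rfl | hu'
          · exact le_refl _
          · exact (List.pairwise_cons.mp ha).1 u hu'
        rw [abs_le] at hd; rw [abs_le] at hgt; omega
      · exact ⟨u, hu, v, hv', hd⟩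
  | case4 a b h1 =>
    cases a with
    | nil => simp
    | cons u us =>
      cases b with
      | nil => simp
      | cons v vs => exact (h1 u us v vs rfl rfl).elim

lemma pvClose_eq_pvAP (a b : List Int) (d : Int) : pvClose a b d = pvAP a b d := by
  have h1 := pvTwoPtr_iff (PySem.List.sorted a (fun x => x) false)
      (PySem.List.sorted b (fun x => x) false) d
      (PySem.List.sorted_pairwise a (fun x => x)) (PySem.List.sorted_pairwise b (fun x => x))
  have h2 := pvAP_iff a b d
  have h3 : pvClose a b d = true ↔ pvAP a b d = true := by
    rw [pvClose, h1, h2]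
    simp [PySem.List.mem_sorted]
  exact Bool.coe_iff_coe.mp h3

lemma pvAOuter_nonneg (tp : List (List Int)) (d : Int) : 0 ≤ pvAOuter tp d := by
  fun_induction pvAOuter tp d with
  | case1 a b rest ih => split <;> omega
  | case2 => simp

lemma pvAOuter_le (a : List Int) (tl : List (List Int)) (d : Int) :
    pvAOuter (a :: tl) d ≤ (tl.length : Int) := by
  induction tl generalizing a with
  | nil => simp [pvAOuter]
  | cons b rest ih =>
    have := ih b
    simp only [pvAOuter, List.length_cons]
    split <;> push_cast <;> omega

lemma prox_main (tp : List (List Int)) (d : Int) (h : tp ≠ []) :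
    (pvAOuter tp d = (tp.length : Int) - 1) ↔ pvBAll tp d = true := by
  induction tp with
  | nil => exact absurd rfl h
  | cons a tl ih =>
    cases tl with
    | nil => simp [pvAOuter, pvBAll]
    | cons b rest =>
      have hrec := ih (by simp)
      have h1 := pvAOuter_le b rest d
      have h2 := pvAOuter_nonneg (b :: rest) d
      have hcl := pvClose_eq_pvAP a b d
      simp only [List.length_cons] at hrec h1
      by_cases hap : pvAP a b d = true
      · simp only [pvAOuter, pvBAll, hcl, hap, if_true, Bool.true_and, List.length_cons]
        rw [← hrec]; push_cast; constructor <;> intro h3 <;> omega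
      · simp only [Bool.not_eq_true] at hap
        simp only [pvAOuter, pvBAll, hcl, hap, Bool.false_and, List.length_cons,
          Bool.false_eq_true, if_false, iff_false]
        push_cast; omega

-- ---- phrase branch ----
-- number of q in [q0, q0 + |rest|) with x + q ∈ rest[q - q0]
def pvCnt (x : Int) (rest : List (List Int)) (q : Int) : Int :=
  match rest with
  | [] => 0
  | l :: rs => (if (x + q) ∈ l then 1 else 0) + pvCnt x rs (q + 1)

lemma pvCnt_nonneg (x : Int) (rest : List (List Int)) (q : Int) : 0 ≤ pvCnt x rest q := by
  induction rest generalizing q with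
  | nil => simp [pvCnt]
  | cons l rs ih => have := ih (q + 1); simp only [pvCnt]; split <;> omega

lemma pvCnt_le (x : Int) (rest : List (List Int)) (q : Int) : pvCnt x rest q ≤ (rest.length : Int) := by
  induction rest generalizing q with
  | nil => simp [pvCnt]
  | cons l rs ih =>
    have := ih (q + 1)
    simp only [pvCnt, List.length_cons]
    split <;> push_cast <;> omega

lemma parseP_getD_not_mem (first l : List Int) (q : Int) (loc : PySem.Dict Int Int)
    (x : Int) (hx : x ∉ first) :
    (pvAParseP first l q loc).getD x 0 = loc.getD x 0 ∧
    (pvAParseP first l q loc).contains x = loc.contains x := by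
  induction first generalizing loc with
  | nil => simp [pvAParseP]
  | cons x0 xs ih =>
    have hxx0 : x ≠ x0 := by intro h; exact hx (h ▸ List.mem_cons_self ..)
    have hxs : x ∉ xs := fun h => hx (List.mem_cons_of_mem _ h)
    simp only [pvAParseP]
    obtain ⟨hg, hc⟩ := ih (loc :=
      (if (x0 + q) ∈ l then
        (if loc.contains x0 = false then loc.insert x0 1 else loc.modify x0 0 (· + 1))
       else loc)) hxs
    refine ⟨hg.trans ?_, hc.trans ?_⟩ <;> split <;> try rfl
    · split
      · exact PySem.Dict.getD_insert_of_ne loc 1 0 hxx0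
      · exact PySem.Dict.getD_modify_of_ne loc 0 (· + 1) hxx0
    · split
      · rw [PySem.Dict.contains_insert]; simp [hxx0]
      · rw [PySem.Dict.contains_modify]; simp [hxx0]

lemma parseP_spec (first l : List Int) (q : Int) (loc : PySem.Dict Int Int)
    (h : first.Nodup) (x : Int) :
    (pvAParseP first l q loc).getD x 0
      = loc.getD x 0 + (if x ∈ first ∧ (x + q) ∈ l then 1 else 0) ∧
    (pvAParseP first l q loc).contains x
      = (loc.contains x || decide (x ∈ first ∧ (x + q) ∈ l)) := by
  induction first generalizing loc with
  | nil => simp [pvAParseP]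
  | cons x0 xs ih =>
    obtain ⟨hx0, hnd⟩ := List.nodup_cons.mp h
    simp only [pvAParseP]
    set loc' := (if (x0 + q) ∈ l then
        (if loc.contains x0 = false then loc.insert x0 1 else loc.modify x0 0 (· + 1))
       else loc) with hloc'
    by_cases hxx : x = x0
    · subst hxx
      obtain ⟨hg, hc⟩ := parseP_getD_not_mem xs l q loc' x hx0
      rw [hg, hc, hloc']
      by_cases hm : (x + q) ∈ l
      · simp only [if_pos hm]
        by_cases hcx : loc.contains x = true
        · rw [if_neg (by simp [hcx])]
          refine ⟨?_, ?_⟩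
          · rw [PySem.Dict.getD_modify_self]
            simp [hm]
          · rw [PySem.Dict.contains_modify]
            simp [hm, hcx]
        · simp only [Bool.not_eq_true] at hcx
          rw [if_pos hcx]
          refine ⟨?_, ?_⟩
          · rw [PySem.Dict.getD_insert_self, PySem.Dict.getD_of_not_contains loc 0 hcx]
            simp [hm]
          · rw [PySem.Dict.contains_insert]
            simp [hm, hcx]
      · simp only [if_neg hm]
        constructor <;> simp [hm]
    · have hmem : (x ∈ x0 :: xs ∧ (x + q) ∈ l) ↔ (x ∈ xs ∧ (x + q) ∈ l) := by
        simp [List.mem_cons, hxx]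
      obtain ⟨hg, hc⟩ := ih (loc := loc') hnd
      rw [hg, hc]
      have hg' : loc'.getD x 0 = loc.getD x 0 := by
        rw [hloc']
        split
        · split
          · exact PySem.Dict.getD_insert_of_ne loc 1 0 hxx
          · exact PySem.Dict.getD_modify_of_ne loc 0 (· + 1) hxx
        · rfl
      have hc' : loc'.contains x = loc.contains x := by
        rw [hloc']
        split
        · split
          · rw [PySem.Dict.contains_insert]; simp [hxx]
          · rw [PySem.Dict.contains_modify]; simp [hxx]
        · rfl
      rw [hg', hc']
      exact ⟨by rw [if_congr hmem rfl rfl], by rw [decide_eq_decide.mpr hmem]⟩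

lemma parseQ_spec (first : List Int) (rest : List (List Int)) (q : Int) (loc : PySem.Dict Int Int)
    (h : first.Nodup) (x : Int) :
    (pvAParseQ first rest q loc).getD x 0
      = loc.getD x 0 + (if x ∈ first then pvCnt x rest q else 0) ∧
    (pvAParseQ first rest q loc).contains x
      = (loc.contains x || decide (x ∈ first ∧ 0 < pvCnt x rest q)) := by
  induction rest generalizing q loc with
  | nil => simp [pvAParseQ, pvCnt]
  | cons l rs ih =>
    simp only [pvAParseQ, pvCnt]
    obtain ⟨hg1, hc1⟩ := parseP_spec first l q loc h x
    obtain ⟨hg2, hc2⟩ := ih (q + 1) (pvAParseP first l q loc)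
    rw [hg2, hc2, hg1, hc1]
    have hnn := pvCnt_nonneg x rs (q + 1)
    by_cases hxf : x ∈ first
    · simp only [hxf, true_and, if_true]
      constructor
      · split <;> omega
      · by_cases hm : (x + q) ∈ l
        · have hpos : (0:Int) < 1 + pvCnt x rs (q + 1) := by omega
          simp [hm, hpos]
        · simp [hm]
    · simp [hxf]

lemma parseP_nodup_keys (first l : List Int) (q : Int) (loc : PySem.Dict Int Int)
    (h : loc.keys.Nodup) : (pvAParseP first l q loc).keys.Nodup := by
  induction first generalizing loc with
  | nil => simpa [pvAParseP] using h
  | cons x0 xs ih =>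
    simp only [pvAParseP]
    apply ih
    split
    · split
      · exact PySem.Dict.nodup_keys_insert loc x0 1 h
      · rw [List.Nodup, PySem.Dict.keys_modify]
        exact PySem.Dict.nodup_keys_insert loc x0 _ h
    · exact h

lemma parseQ_nodup_keys (first : List Int) (rest : List (List Int)) (q : Int)
    (loc : PySem.Dict Int Int) (h : loc.keys.Nodup) : (pvAParseQ first rest q loc).keys.Nodup := by
  induction rest generalizing q loc with
  | nil => simpa [pvAParseQ] using h
  | cons l rs ih => exact ih (q + 1) _ (parseP_nodup_keys first l q loc h)

lemma dict_any_iff (loc : PySem.Dict Int Int) (v : Int) (hnd : loc.keys.Nodup) :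
    (loc.items.any fun p => decide (p.2 = v)) = true ↔
      ∃ k, loc.contains k = true ∧ loc.getD k 0 = v := by
  rw [List.any_eq_true]
  constructor
  · rintro ⟨⟨k, w⟩, hmem, hv⟩
    simp only [decide_eq_true_eq] at hv
    refine ⟨k, (PySem.Dict.contains_iff_mem_keys _ _).mpr
      (PySem.Dict.mem_keys_of_mem_items _ hmem), ?_⟩
    rw [PySem.Dict.getD_of_mem_items _ hmem hnd 0]
    exact hv
  · rintro ⟨k, hc, hg⟩
    have hs : (loc.get? k).isSome := by rw [← PySem.Dict.contains_eq_isSome_get?]; exact hc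
    obtain ⟨w, hw⟩ := Option.isSome_iff_exists.mp hs
    refine ⟨(k, w), PySem.Dict.mem_items_of_get?_eq_some _ hw, ?_⟩
    have hgw : loc.getD k 0 = w := by
      rw [PySem.Dict.getD_eq_get?_getD, hw]; rfl
    simp [← hg, hgw]

lemma pvBAllQ_iff (x : Int) (rest : List (List Int)) (q : Int) :
    pvBAllQ x (rest.map PySem.Set.ofList) q = true ↔ pvCnt x rest q = (rest.length : Int) := by
  induction rest generalizing q with
  | nil => simp [pvBAllQ, pvCnt]
  | cons l rs ih =>
    have hle := pvCnt_le x rs (q + 1)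
    have hnn := pvCnt_nonneg x rs (q + 1)
    simp only [List.map_cons, pvBAllQ, pvCnt, List.length_cons, Bool.and_eq_true,
      decide_eq_true_eq, PySem.Set.mem_ofList]
    rw [ih (q + 1)]
    constructor
    · rintro ⟨hm, he⟩
      rw [if_pos hm, he]; push_cast; ring
    · intro he
      by_cases hm : (x + q) ∈ l
      · rw [if_pos hm] at he; push_cast at he; exact ⟨hm, by omega⟩
      · rw [if_neg hm] at he; push_cast at he; omega

-- ===== VERDICT (by name: the statement is the Claim_ definition above) =====
theorem find_position_distance_spec : Claim_equal_find_position_distance := by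
  intro tp d _hdom hpre
  unfold Spec_find_position_distance find_position_distance find_position_distance_alt
  by_cases hd : d = -1
  · -- phrase branch
    have hnd : (tp.headD []).Nodup := hpre.2 hd
    subst hd
    have hcond : ¬((-1 : Int) ≠ -1) := by simp
    rw [if_neg hcond, if_neg hcond]
    cases tp with
    | nil => rfl
    | cons a tl =>
      simp only [List.headD_cons] at hnd
      have hK := parseQ_nodup_keys a tl 1 PySem.Dict.empty (by simp)
      cases tl with
      | nil => rfl
      | cons l rs =>
        have hn1 : ((a :: l :: rs).length : Int) - 1 = ((l :: rs).length : Int) := by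
          simp only [List.length_cons]; push_cast; ring
        have hA : ((pvAParseQ (List.headD (a :: l :: rs) []) (a :: l :: rs).tail 1
              PySem.Dict.empty).items.any
              (fun p => decide (p.2 = ((a :: l :: rs).length : Int) - 1))) = true ↔
            ∃ k ∈ a, pvCnt k (l :: rs) 1 = ((l :: rs).length : Int) := by
          simp only [List.headD_cons, List.tail_cons]
          rw [dict_any_iff _ _ hK]
          constructor
          · rintro ⟨k, hc, hg⟩
            obtain ⟨hg', hc'⟩ := parseQ_spec a (l :: rs) 1 PySem.Dict.empty hnd k
            rw [hc'] at hc
            rw [hg'] at hg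
            simp only [PySem.Dict.contains_empty, Bool.false_or, decide_eq_true_eq] at hc
            simp only [PySem.Dict.getD_empty, zero_add] at hg
            rw [if_pos hc.1, hn1] at hg
            exact ⟨k, hc.1, hg⟩
          · rintro ⟨k, hk, hc⟩
            obtain ⟨hg', hc'⟩ := parseQ_spec a (l :: rs) 1 PySem.Dict.empty hnd k
            have hpos : 0 < pvCnt k (l :: rs) 1 := by
              rw [hc]; simp only [List.length_cons]; push_cast; omega
            refine ⟨k, ?_, ?_⟩
            · rw [hc']
              simp only [PySem.Dict.contains_empty, Bool.false_or, decide_eq_true_eq]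
              exact ⟨hk, hpos⟩
            · rw [hg']
              simp only [PySem.Dict.getD_empty, zero_add]
              rw [if_pos hk, hn1]
              exact hc
        have hB : ((List.headD (a :: l :: rs) []).any
              (fun x => pvBAllQ x ((a :: l :: rs).tail.map PySem.Set.ofList) 1)) = true ↔
            ∃ k ∈ a, pvCnt k (l :: rs) 1 = ((l :: rs).length : Int) := by
          simp only [List.headD_cons, List.tail_cons]
          rw [List.any_eq_true]
          constructor
          · rintro ⟨k, hk, hb⟩; exact ⟨k, hk, (pvBAllQ_iff k (l :: rs) 1).mp hb⟩
          · rintro ⟨k, hk, hc⟩; exact ⟨k, hk, (pvBAllQ_iff k (l :: rs) 1).mpr hc⟩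
        have hguard : 1 < (a :: l :: rs).length := by simp
        rw [if_pos hguard]
        by_cases hcond : ∃ k ∈ a, pvCnt k (l :: rs) 1 = ((l :: rs).length : Int)
        · rw [if_pos (hA.mpr hcond), if_pos (hB.mpr hcond)]
        · rw [if_neg (fun h => hcond (hA.mp h)), if_neg (fun h => hcond (hB.mp h))]
  · -- proximity branch
    have hne : tp ≠ [] := hpre.1 hd
    rw [if_pos hd, if_pos hd]
    have hiff := prox_main tp d hne
    by_cases hA : pvAOuter tp d = (tp.length : Int) - 1
    · rw [if_pos hA, if_pos (hiff.mp hA)]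
    · rw [if_neg hA, if_neg (fun h => hA (hiff.mpr h))]
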